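-- pv_equiv track=rewrite | github.com/SymphonyIceAttack/pytoexe-use | python-files/1776475090059-0tg7-Opera.py | _generate_cookies_html
-- ===== SOURCE A (Python) =====
-- def _generate_cookies_html(cookies, template):
--     """Генерация HTML для куков с группировкой по браузерам"""
--     if not cookies:
--         return "<p style='color: var(--text-secondary);'>Куки не найдены</p>"
--
--     html = f"<h3 style='color: var(--accent); margin-bottom: 1rem;'>Найдено {len(cookies)} куков</h3>"
--
--     # Группируем по браузерам
--     browsers = {}
--     for cookie in cookies:
--         browser = cookie.get('browser', 'Unknown')
--         if browser not in browsers: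
--             browsers[browser] = []
--         browsers[browser].append(cookie)
--
--     for browser, browser_cookies in browsers.items():
--         html += f"""
--         <div class="browser-section">
--             <h4 style='color: var(--accent); margin: 1rem 0 0.5rem 0; padding: 0.5rem; background: var(--bg-secondary); border-radius: 4px;'>
--                 <i class="fas fa-globe"></i> {browser} ({len(browser_cookies)} куков)
--             </h4>
--             <div class="cookies-grid">
--         """
--
--         for i, cookie in enumerate(browser_cookies[:10], 1):  # Показываем первые 10 для каждого браузера
--             html += f"""
--             <div class="cookie-item">
--                 <div class="cookie-name">{cookie.get('name', 'N/A')}</div>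
--                 <div class="cookie-value">{cookie.get('value', 'N/A')}</div>
--                 <div style='color: var(--text-secondary); font-size: 0.8rem; margin-top: 0.3rem;'>
--                     {cookie.get('domain', 'N/A')} - {cookie.get('path', 'N/A')}
--                 </div>
--             </div>
--             """
--
--         if len(browser_cookies) > 10:
--             html += f"""
--             <div class="show-more-btn" onclick="showMoreCookies('{browser}', {len(browser_cookies) - 10})">
--                 Показать еще {len(browser_cookies) - 10} куков
--             </div>
--             """
--
--         html += "</div></div>"
--
--     return html
-- ===== SOURCE B (Python) =====
-- def _render_cookie(cookie):
--     return f"""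
--             <div class="cookie-item">
--                 <div class="cookie-name">{cookie.get('name', 'N/A')}</div>
--                 <div class="cookie-value">{cookie.get('value', 'N/A')}</div>
--                 <div style='color: var(--text-secondary); font-size: 0.8rem; margin-top: 0.3rem;'>
--                     {cookie.get('domain', 'N/A')} - {cookie.get('path', 'N/A')}
--                 </div>
--             </div>
--             """
--
--
-- def _render_section(browser, group):
--     head = f"""
--         <div class="browser-section">
--             <h4 style='color: var(--accent); margin: 1rem 0 0.5rem 0; padding: 0.5rem; background: var(--bg-secondary); border-radius: 4px;'>
--                 <i class="fas fa-globe"></i> {browser} ({len(group)} куков)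
--             </h4>
--             <div class="cookies-grid">
--         """
--     body = ''.join(_render_cookie(c) for c in group[:10])
--     more = f"""
--             <div class="show-more-btn" onclick="showMoreCookies('{browser}', {len(group) - 10})">
--                 Показать еще {len(group) - 10} куков
--             </div>
--             """ if len(group) > 10 else ''
--     return head + body + more + "</div></div>"
--
--
-- def _generate_cookies_html(cookies, template):
--     if not cookies:
--         return "<p style='color: var(--text-secondary);'>Куки не найдены</p>"
--     order = list(dict.fromkeys(c.get('browser', 'Unknown') for c in cookies))
--     sections = [_render_section(b, [c for c in cookies
--                                     if c.get('browser', 'Unknown') == b])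
--                 for b in order]
--     return f"<h3 style='color: var(--accent); margin-bottom: 1rem;'>Найдено {len(cookies)} куков</h3>" + ''.join(sections)
-- ===== Notes on version B (the rewrite author's own statement) =====
-- stated objective: alternative
-- what changed: Replaces A's single dict-grouping pass plus one growing string accumulator with a different decomposition: compute the distinct browser names in first-appearance order, build each browser's group by filtering the whole cookie list, render each section independently via helper functions, and join the section strings.
import Mathlib
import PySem

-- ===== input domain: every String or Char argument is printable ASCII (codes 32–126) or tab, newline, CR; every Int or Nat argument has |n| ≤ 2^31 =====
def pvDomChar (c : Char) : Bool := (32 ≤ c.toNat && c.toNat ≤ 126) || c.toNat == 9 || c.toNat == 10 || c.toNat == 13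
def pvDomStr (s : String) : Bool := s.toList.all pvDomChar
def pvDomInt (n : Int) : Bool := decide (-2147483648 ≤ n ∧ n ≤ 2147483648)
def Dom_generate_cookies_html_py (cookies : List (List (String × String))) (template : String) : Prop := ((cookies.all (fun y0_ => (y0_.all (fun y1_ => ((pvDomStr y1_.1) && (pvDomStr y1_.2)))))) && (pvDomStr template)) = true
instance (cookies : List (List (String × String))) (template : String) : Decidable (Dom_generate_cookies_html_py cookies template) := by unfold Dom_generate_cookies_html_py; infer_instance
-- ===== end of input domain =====

-- B re-implements the report in a different decomposition (same output, similar cost):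
-- distinct browsers in first-appearance order, then a per-browser filter and a
-- join of independently rendered section strings, instead of A's dict-grouping
-- pass and one big string accumulator.

-- ===== PORT A =====
-- cookie.get(k, dflt) on a dict modelled as an association list (first match wins)
def pvGet (c : List (String × String)) (k dflt : String) : String :=
  match c.find? (fun p => p.1 == k) with
  | some p => p.2
  | none => dflt

-- literal transliteration of A: empty guard, h3 header, one grouping pass into an
-- insertion-ordered dict, then one fold over items() appending section/cookie/show-more text
def generate_cookies_html_py (cookies : List (List (String × String))) (template : String) : String :=
  if cookies = [] then "<p style='color: var(--text-secondary);'>Куки не найдены</p>"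
  else
    let html := "<h3 style='color: var(--accent); margin-bottom: 1rem;'>Найдено " ++ PySem.Int.toStr (cookies.length : Int) ++ " куков</h3>"
    let browsers : PySem.Dict String (List (List (String × String))) :=
      cookies.foldl (fun d cookie =>
        let browser := pvGet cookie "browser" "Unknown"
        let d := if d.contains browser then d else d.insert browser []
        d.modify browser [] (fun l => l ++ [cookie])) PySem.Dict.empty
    browsers.items.foldl (fun html bc =>
      let browser := bc.1
      let browser_cookies := bc.2
      let html := html ++ "\n        <div class=\"browser-section\">\n            <h4 style='color: var(--accent); margin: 1rem 0 0.5rem 0; padding: 0.5rem; background: var(--bg-secondary); border-radius: 4px;'>\n                <i class=\"fas fa-globe\"></i> " ++ browser ++ " (" ++ PySem.Int.toStr (browser_cookies.length : Int) ++ " куков)\n            </h4>\n            <div class=\"cookies-grid\">\n        "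
      let html := (browser_cookies.take 10).foldl (fun html cookie =>
        html ++ "\n            <div class=\"cookie-item\">\n                <div class=\"cookie-name\">" ++ pvGet cookie "name" "N/A" ++ "</div>\n                <div class=\"cookie-value\">" ++ pvGet cookie "value" "N/A" ++ "</div>\n                <div style='color: var(--text-secondary); font-size: 0.8rem; margin-top: 0.3rem;'>\n                    " ++ pvGet cookie "domain" "N/A" ++ " - " ++ pvGet cookie "path" "N/A" ++ "\n                </div>\n            </div>\n            ") html
      let html := if browser_cookies.length > 10 then
          html ++ "\n            <div class=\"show-more-btn\" onclick=\"showMoreCookies('" ++ browser ++ "', " ++ PySem.Int.toStr ((browser_cookies.length : Int) - 10) ++ ")\">\n                Показать еще " ++ PySem.Int.toStr ((browser_cookies.length : Int) - 10) ++ " куков\n            </div>\n            "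
        else html
      html ++ "</div></div>") html

-- ===== PORT B =====
def pvRenderCookie (cookie : List (String × String)) : String :=
  "\n            <div class=\"cookie-item\">\n                <div class=\"cookie-name\">" ++ pvGet cookie "name" "N/A" ++ "</div>\n                <div class=\"cookie-value\">" ++ pvGet cookie "value" "N/A" ++ "</div>\n                <div style='color: var(--text-secondary); font-size: 0.8rem; margin-top: 0.3rem;'>\n                    " ++ pvGet cookie "domain" "N/A" ++ " - " ++ pvGet cookie "path" "N/A" ++ "\n                </div>\n            </div>\n            "

def pvRenderSection (browser : String) (group : List (List (String × String))) : String :=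
  let head := "\n        <div class=\"browser-section\">\n            <h4 style='color: var(--accent); margin: 1rem 0 0.5rem 0; padding: 0.5rem; background: var(--bg-secondary); border-radius: 4px;'>\n                <i class=\"fas fa-globe\"></i> " ++ browser ++ " (" ++ PySem.Int.toStr (group.length : Int) ++ " куков)\n            </h4>\n            <div class=\"cookies-grid\">\n        "
  let body := String.join ((group.take 10).map pvRenderCookie)
  let more := if group.length > 10 then
      "\n            <div class=\"show-more-btn\" onclick=\"showMoreCookies('" ++ browser ++ "', " ++ PySem.Int.toStr ((group.length : Int) - 10) ++ ")\">\n                Показать еще " ++ PySem.Int.toStr ((group.length : Int) - 10) ++ " куков\n            </div>\n            "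
    else ""
  head ++ body ++ more ++ "</div></div>"

def generate_cookies_html_py_alt (cookies : List (List (String × String))) (template : String) : String :=
  if cookies = [] then "<p style='color: var(--text-secondary);'>Куки не найдены</p>"
  else
    let order := PySem.List.dedup (cookies.map (fun c => pvGet c "browser" "Unknown"))
    let sections := order.map (fun b =>
      pvRenderSection b (cookies.filter (fun c => pvGet c "browser" "Unknown" == b)))
    "<h3 style='color: var(--accent); margin-bottom: 1rem;'>Найдено " ++ PySem.Int.toStr (cookies.length : Int) ++ " куков</h3>" ++ String.join sections

-- ===== PRECONDITION & SPEC =====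
def Spec_generate_cookies_html_py (cookies : List (List (String × String))) (template : String) (out : String) : Prop := out = generate_cookies_html_py_alt cookies template
instance (cookies : List (List (String × String))) (template : String) (out : String) : Decidable (Spec_generate_cookies_html_py cookies template out) := by unfold Spec_generate_cookies_html_py; infer_instance

-- ===== CLAIM (what is proved, stated in full; the proofs are below) =====
def Claim_equal_generate_cookies_html_py : Prop := ∀ (cookies : List (List (String × String))) (template : String), Dom_generate_cookies_html_py cookies template → Spec_generate_cookies_html_py cookies template (generate_cookies_html_py cookies template)

-- ===== LEMMAS AND PROOFS =====

-- String.join is the fold of ++ from any starting string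
theorem str_join_foldl (l : List String) (a : String) :
    l.foldl (fun r s => r ++ s) a = a ++ String.join l := by
  induction l generalizing a with
  | nil => simp [String.join]
  | cons x xs ih =>
      have hj : String.join (x :: xs) = x ++ String.join xs := by
        show List.foldl (fun r s => r ++ s) ("" ++ x) xs = _
        rw [ih]
        simp
      rw [List.foldl_cons, ih, hj, String.append_assoc]

-- a left fold that only appends text is the join of the rendered pieces
theorem str_foldl_append {α : Type} (l : List α) (f : α → String) (a : String) :
    l.foldl (fun h x => h ++ f x) a = a ++ String.join (l.map f) := by
  have h := str_join_foldl (l.map f) a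
  rw [List.foldl_map] at h
  exact h

-- A's "setdefault then append" grouping step is a single modify
theorem step_eq_modify (d : PySem.Dict String (List (List (String × String))))
    (b : String) (c : List (String × String)) :
    (if d.contains b then d else d.insert b []).modify b [] (fun l => l ++ [c])
      = d.modify b [] (fun l => l ++ [c]) := by
  by_cases h : d.contains b
  · simp [h]
  · rw [if_neg h]
    unfold PySem.Dict.modify
    rw [PySem.Dict.getD_insert_self, PySem.Dict.insert_insert_self,
        PySem.Dict.getD_of_not_contains _ _ (by simpa using h)]

-- the grouping dict's items: first-appearance browsers, each with its filtered cookies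
theorem group_items (cookies : List (List (String × String))) :
    (cookies.foldl (fun d c =>
        PySem.Dict.modify d (pvGet c "browser" "Unknown") [] (fun l => l ++ [c]))
        PySem.Dict.empty).items
      = (PySem.List.dedup (cookies.map (fun c => pvGet c "browser" "Unknown"))).map
          (fun b => (b, cookies.filter (fun c => pvGet c "browser" "Unknown" == b))) := by
  have hnd := PySem.Dict.nodup_keys_foldl_modify_key cookies
      (fun c => pvGet c "browser" "Unknown") []
      (fun _ c => fun l => l ++ [c]) PySem.Dict.empty
      (by rw [PySem.Dict.keys_empty]; exact List.nodup_nil)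
  have hkeys := PySem.Dict.keys_foldl_modify_key cookies
      (fun c => pvGet c "browser" "Unknown") []
      (fun _ c => fun l => l ++ [c]) PySem.Dict.empty
  rw [PySem.Dict.items_eq_map_keys _ hnd ([] : List (List (String × String))), hkeys,
      PySem.Dict.keys_empty, PySem.List.dedup_eq_ofList]
  have hup : PySem.Set.update ([] : List String)
      (cookies.map (fun c => pvGet c "browser" "Unknown"))
      = PySem.Set.ofList (cookies.map (fun c => pvGet c "browser" "Unknown")) := rfl
  rw [← hup]
  apply List.map_congr_left
  intro b _
  have hg := PySem.Dict.getD_foldl_modify_append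
      (cookies.map (fun c => (pvGet c "browser" "Unknown", c))) PySem.Dict.empty b
  rw [List.foldl_map] at hg
  simp only [List.filter_map, PySem.Dict.getD_empty, List.nil_append, List.map_map] at hg
  exact congrArg (fun v => (b, v)) (by simpa [Function.comp_def] using hg)

-- ===== VERDICT (by name: the statement is the Claim_ definition above) =====
theorem generate_cookies_html_py_spec : Claim_equal_generate_cookies_html_py := by
  intro cookies template _
  unfold Spec_generate_cookies_html_py
  by_cases hc : cookies = []
  · simp [generate_cookies_html_py, generate_cookies_html_py_alt, hc]
  · simp only [generate_cookies_html_py, generate_cookies_html_py_alt, if_neg hc]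
    simp only [step_eq_modify, group_items, List.foldl_map]
    rw [List.foldl_ext _ (fun x y => x ++ pvRenderSection y
          (cookies.filter (fun c => pvGet c "browser" "Unknown" == y))) _
        (fun a b _ => by
          simp only [String.append_assoc]
          rw [str_foldl_append]
          simp only [pvRenderSection]
          split_ifs with hp <;>
            simp [String.append_assoc, String.append_empty] <;>
            exact congrArg String.join (congrArg (List.take 10)
              (List.map_congr_left (fun c _ => by
                simp [pvRenderCookie, String.append_assoc]))))]
    rw [str_foldl_append]
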